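-- pv_equiv track=rewrite | github.com/norphiil/TLS3_M1_IAFA_MPI_TP | ex/n-bodies-base-mpi-v2.py | split_equal
-- ===== SOURCE A (Python) =====
-- def split_equal(x, n) -> list:
--     result = [0]
--     offset = 0
--     if (x < n):
--         result.append(x)
--         return result
--     elif (x % n == 0):
--         for i in range(n):
--             result.append(x // n + offset)
--             offset += x // n
--     else:
--         zp = n - (x % n)
--         pp = x // n
--         for i in range(n):
--             if (i >= zp):
--                 result.append(pp + 1 + offset)
--                 offset += pp + 1
--             else:
--                 result.append(pp + offset)
--                 offset += pp
--     return result
-- ===== SOURCE B (Python) =====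
-- def split_equal(x, n) -> list:
--     if x < n:
--         return [0, x]
--     pp = x // n
--     zp = n - (x % n)
--     return [i * pp + max(0, i - zp) for i in range(n + 1)]
-- ===== Notes on version B (the rewrite author's own statement) =====
-- stated objective: simpler
-- what changed: Replaces the divisible/non-divisible case split and the sequential running-offset loop with branch by a single closed-form comprehension i*pp + max(0, i-zp) over range(n+1).
-- outside the precondition, e.g. on split_equal(5, -3): A returns [0], B returns []
import Mathlib
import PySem

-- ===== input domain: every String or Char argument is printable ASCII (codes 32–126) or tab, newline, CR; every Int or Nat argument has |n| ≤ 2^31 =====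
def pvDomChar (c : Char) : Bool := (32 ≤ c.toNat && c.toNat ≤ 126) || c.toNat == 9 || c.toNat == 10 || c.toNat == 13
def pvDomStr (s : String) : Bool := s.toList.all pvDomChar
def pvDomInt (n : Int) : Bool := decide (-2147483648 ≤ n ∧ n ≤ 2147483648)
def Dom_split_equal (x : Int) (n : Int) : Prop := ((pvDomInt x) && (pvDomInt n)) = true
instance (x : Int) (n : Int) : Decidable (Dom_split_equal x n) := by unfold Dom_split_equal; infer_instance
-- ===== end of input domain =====

-- B computes each cumulative offset by the closed form i*pp + max(0, i-zp) instead of A's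
-- two-branch loop with a running accumulator; objective: simpler.


-- ===== PORT A =====
def split_equal (x : Int) (n : Int) : List Int :=
  if x < n then [0, x]
  else if PySem.Int.mod x n = 0 then
    ((PySem.List.pyRange 0 n 1).foldl
      (fun (st : List Int × Int) _ =>
        (st.1 ++ [PySem.Int.floordiv x n + st.2], st.2 + PySem.Int.floordiv x n))
      ([0], 0)).1
  else
    ((PySem.List.pyRange 0 n 1).foldl
      (fun (st : List Int × Int) i =>
        if n - PySem.Int.mod x n ≤ i then
          (st.1 ++ [PySem.Int.floordiv x n + 1 + st.2], st.2 + (PySem.Int.floordiv x n + 1))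
        else
          (st.1 ++ [PySem.Int.floordiv x n + st.2], st.2 + PySem.Int.floordiv x n))
      ([0], 0)).1

-- ===== PORT B =====
def split_equal_alt (x : Int) (n : Int) : List Int :=
  if x < n then [0, x]
  else
    (PySem.List.pyRange 0 (n + 1) 1).map
      (fun i => i * PySem.Int.floordiv x n + max 0 (i - (n - PySem.Int.mod x n)))

-- ===== PRECONDITION & SPEC =====
-- Pre_ restricts to the natural domain: a positive chunk count n ≥ 1, plus the early-return
-- region x < n where n is never used. Excluded: n = 0 with x ≥ 0 (A raises ZeroDivisionError)
-- and negative n with x ≥ n (a negative chunk count, outside the function's natural domain,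
-- where A returns the degenerate [0]).
def Pre_split_equal (x : Int) (n : Int) : Prop := 1 ≤ n ∨ x < n
instance (x : Int) (n : Int) : Decidable (Pre_split_equal x n) := by unfold Pre_split_equal; infer_instance
def pvWitness_split_equal : Int × Int := (7, 3)
def Spec_split_equal (x : Int) (n : Int) (out : List Int) : Prop := out = split_equal_alt x n
instance (x : Int) (n : Int) (out : List Int) : Decidable (Spec_split_equal x n out) := by unfold Spec_split_equal; infer_instance

-- ===== CLAIM (what is proved, stated in full; the proofs are below) =====
def Claim_equal_split_equal : Prop := ∀ (x : Int) (n : Int), Dom_split_equal x n → Pre_split_equal x n → Spec_split_equal x n (split_equal x n)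

-- ===== LEMMAS AND PROOFS =====

-- A's divisible-case fold after k steps: the cumulative multiples of q, with offset k*q.
theorem pv_fold_div (x n : Int) (k : Nat) :
    (PySem.List.pyRange 0 (k : Int) 1).foldl
      (fun (st : List Int × Int) _ =>
        (st.1 ++ [PySem.Int.floordiv x n + st.2], st.2 + PySem.Int.floordiv x n)) ([0], 0)
    = ((PySem.List.pyRange 0 ((k : Int) + 1) 1).map (fun i => i * PySem.Int.floordiv x n),
       (k : Int) * PySem.Int.floordiv x n) := by
  induction k with
  | zero =>
      have h0 : PySem.List.pyRange 0 1 1 = [0] := by decide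
      refine Prod.ext ?_ ?_ <;> simp [PySem.List.pyRange_one_eq_nil, h0]
  | succ m ih =>
      push_cast
      rw [PySem.List.pyRange_one_succ_right (by positivity),
          PySem.List.pyRange_one_succ_right (a := 0) (b := (m : Int) + 1) (by positivity),
          List.foldl_append, List.map_append, ih]
      refine Prod.ext ?_ ?_ <;> simp <;> ring

-- A's general-case fold after k steps: the closed-form cumulative offsets i*pp + max 0 (i-zp).
theorem pv_fold_gen (pp zp : Int) (hzp : 0 ≤ zp) (k : Nat) :
    (PySem.List.pyRange 0 (k : Int) 1).foldl
      (fun (st : List Int × Int) i =>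
        if zp ≤ i then (st.1 ++ [pp + 1 + st.2], st.2 + (pp + 1))
        else (st.1 ++ [pp + st.2], st.2 + pp)) ([0], 0)
    = ((PySem.List.pyRange 0 ((k : Int) + 1) 1).map (fun i => i * pp + max 0 (i - zp)),
       (k : Int) * pp + max 0 ((k : Int) - zp)) := by
  induction k with
  | zero =>
      have h0 : PySem.List.pyRange 0 1 1 = [0] := by decide
      refine Prod.ext ?_ ?_ <;> simp [PySem.List.pyRange_one_eq_nil, h0] <;> omega
  | succ m ih =>
      push_cast
      rw [PySem.List.pyRange_one_succ_right (by positivity),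
          PySem.List.pyRange_one_succ_right (a := 0) (b := (m : Int) + 1) (by positivity),
          List.foldl_append, List.map_append, ih]
      simp only [List.foldl_cons, List.foldl_nil]
      by_cases h : zp ≤ (m : Int)
      · have h1 : max 0 ((m : Int) - zp) = (m : Int) - zp := max_eq_right (by omega)
        have h2 : max 0 ((m : Int) + 1 - zp) = (m : Int) + 1 - zp := max_eq_right (by omega)
        rw [if_pos h]
        refine Prod.ext ?_ ?_ <;> simp [h1, h2] <;> ring
      · have h1 : max 0 ((m : Int) - zp) = 0 := max_eq_left (by omega)
        have h2 : max 0 ((m : Int) + 1 - zp) = 0 := max_eq_left (by omega)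
        rw [if_neg h]
        refine Prod.ext ?_ ?_ <;> simp [h1, h2] <;> ring

-- ===== VERDICT (by name: the statement is the Claim_ definition above) =====
theorem split_equal_spec : Claim_equal_split_equal := by
  intro x n _hdom hpre
  unfold Spec_split_equal split_equal split_equal_alt
  by_cases hlt : x < n
  · simp [hlt]
  · have hn : 1 ≤ n := hpre.resolve_right hlt
    obtain ⟨k, rfl⟩ : ∃ k : ℕ, n = k := ⟨n.toNat, (Int.toNat_of_nonneg (by omega)).symm⟩
    simp only [hlt, if_false]
    by_cases hm : PySem.Int.mod x (k : Int) = 0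
    · rw [if_pos hm, pv_fold_div, hm]
      apply List.map_congr_left
      intro i hi
      rw [PySem.List.mem_pyRange_one] at hi
      rw [show max 0 (i - ((k : Int) - 0)) = 0 from by omega, add_zero]
    · have hk0 : (0 : Int) < (k : Int) := by exact_mod_cast hn
      have hmlt : PySem.Int.mod x (k : Int) < (k : Int) := PySem.Int.mod_lt x hk0
      rw [if_neg hm, pv_fold_gen _ _ (by omega)]
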